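-- pv_equiv track=rewrite | github.com/KeplerGO/pyke | pyke/kepstat.py | filterOnRange
-- ===== SOURCE A (Python) =====
-- def filterOnRange(intime,tstart,tstop):
--     """filter on data within time ranges"""
--     outlist = []
--     for i in range(len(intime)):
--         for j in range(len(tstart)):
--             if intime[i] > tstart[j] and intime[i] < tstop[j]:
--                 if len(outlist) == 0:
--                     outlist.append(i)
--                 elif i > outlist[-1]:
--                     outlist.append(i)
--     return outlist
-- ===== SOURCE B (Python) =====
-- def filterOnRange(intime, tstart, tstop):
--     """filter on data within time ranges"""
--     # normalize the ranges: drop empty ones, sort by start, merge overlapping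
--     ivs = sorted((p for p in zip(tstart, tstop) if p[0] < p[1]),
--                  key=lambda p: p[0])
--     merged = []
--     cur = None
--     for a, b in ivs:
--         if cur is None:
--             cur = (a, b)
--         elif a < cur[1]:
--             if b > cur[1]:
--                 cur = (cur[0], b)
--         else:
--             merged.append(cur)
--             cur = (a, b)
--     if cur is not None:
--         merged.append(cur)
--     starts = [p[0] for p in merged]
--     stops = [p[1] for p in merged]
--     # binary-search each time into the disjoint merged ranges
--     out = []
--     for i, t in enumerate(intime):
--         lo, hi = 0, len(starts)
--         while lo < hi:
--             mid = (lo + hi) // 2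
--             if starts[mid] < t:
--                 lo = mid + 1
--             else:
--                 hi = mid
--         if lo > 0 and t < stops[lo - 1]:
--             out.append(i)
--     return out
-- ===== Notes on version B (the rewrite author's own statement) =====
-- stated objective: faster
-- what changed: B sorts the non-empty (start,stop) pairs, merges them into disjoint ranges, and binary-searches each time into the merged starts, replacing A's nested scan of every time against every range with outlist[-1] dedup.
import Mathlib
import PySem

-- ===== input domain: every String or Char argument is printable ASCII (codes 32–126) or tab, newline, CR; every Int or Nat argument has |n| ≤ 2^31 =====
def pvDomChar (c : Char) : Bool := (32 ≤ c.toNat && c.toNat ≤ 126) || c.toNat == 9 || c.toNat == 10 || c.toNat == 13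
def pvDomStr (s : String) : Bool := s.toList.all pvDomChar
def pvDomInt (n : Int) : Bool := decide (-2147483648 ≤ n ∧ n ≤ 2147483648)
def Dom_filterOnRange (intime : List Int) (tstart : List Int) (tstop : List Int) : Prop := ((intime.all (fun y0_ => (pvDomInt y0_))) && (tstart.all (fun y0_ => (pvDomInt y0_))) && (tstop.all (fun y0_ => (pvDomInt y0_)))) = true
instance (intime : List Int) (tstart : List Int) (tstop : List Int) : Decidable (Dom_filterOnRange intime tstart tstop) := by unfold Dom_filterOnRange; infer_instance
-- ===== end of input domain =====

-- B sorts the non-empty (start,stop) pairs, merges them into disjoint ranges and binary-searches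
-- each time into the merged starts, replacing A's scan of every time against every raw range;
-- objective: faster (timed by the check).

-- ===== PORT A =====
def filterOnRange (intime : List Int) (tstart : List Int) (tstop : List Int) : List Int :=
  (PySem.List.pyRange 0 (intime.length : Int) 1).foldl (fun outlist i =>
    (PySem.List.pyRange 0 (tstart.length : Int) 1).foldl (fun outlist j =>
      if PySem.List.pyGetD intime i 0 > PySem.List.pyGetD tstart j 0 ∧
         PySem.List.pyGetD intime i 0 < PySem.List.pyGetD tstop j 0 then
        if outlist.length = 0 then outlist ++ [i]
        else if i > PySem.List.pyGetD outlist (-1) 0 then outlist ++ [i]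
        else outlist
      else outlist) outlist) []

-- ===== PORT B =====
-- Source B's while-loop binary search (mid = (lo+hi)//2), as a recursion on hi - lo
def bsLoop (starts : List Int) (t : Int) (lo hi : Int) : Int :=
  if h : lo < hi then
    if PySem.List.pyGetD starts (PySem.Int.floordiv (lo + hi) 2) 0 < t then
      bsLoop starts t (PySem.Int.floordiv (lo + hi) 2 + 1) hi
    else
      bsLoop starts t lo (PySem.Int.floordiv (lo + hi) 2)
  else lo
termination_by (hi - lo).toNat
decreasing_by
  · have h1 := PySem.Int.floordiv_two_mid_bounds (lo := lo) (hi := hi) h.le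
    have h2 : PySem.Int.floordiv (lo + hi) 2 < hi := by
      rw [PySem.Int.floordiv_lt_iff_lt_mul (by omega)]; omega
    omega
  · have h1 := PySem.Int.floordiv_two_mid_bounds (lo := lo) (hi := hi) h.le
    have h2 : PySem.Int.floordiv (lo + hi) 2 < hi := by
      rw [PySem.Int.floordiv_lt_iff_lt_mul (by omega)]; omega
    omega

-- the body of Source B's merge loop (state: merged list so far, current open range or None)
def stepB (mc : List (Int × Int) × Option (Int × Int)) (ab : Int × Int) :
    List (Int × Int) × Option (Int × Int) :=
  match mc.2 with
  | none => (mc.1, some ab)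
  | some c =>
    if ab.1 < c.2 then
      (if ab.2 > c.2 then (mc.1, some (c.1, ab.2)) else mc)
    else (mc.1 ++ [c], some ab)

def filterOnRange_alt (intime : List Int) (tstart : List Int) (tstop : List Int) : List Int :=
  let ivs := PySem.List.sorted ((tstart.zip tstop).filter (fun p => decide (p.1 < p.2)))
    (fun p => p.1) false
  let mc := ivs.foldl stepB (([], none) : List (Int × Int) × Option (Int × Int))
  let merged := match mc.2 with | none => mc.1 | some c => mc.1 ++ [c]
  let starts := merged.map (fun p => p.1)
  let stops := merged.map (fun p => p.2)
  (PySem.List.enumerate intime 0).foldl (fun (out : List Int) (p : Int × Int) =>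
    let lo : Int := bsLoop starts p.2 0 (starts.length : Int)
    if lo > 0 ∧ p.2 < PySem.List.pyGetD stops (lo - 1) 0 then out ++ [p.1] else out) ([] : List Int)

-- ===== PRECONDITION & SPEC =====
-- Pre_ excludes exactly the inputs where A raises IndexError: an unpaired start value
-- tstart[j] (j ≥ len(tstop)) below some time value makes A evaluate tstop[j].
def Pre_filterOnRange (intime : List Int) (tstart : List Int) (tstop : List Int) : Prop :=
  ∀ a ∈ tstart.drop tstop.length, ∀ t ∈ intime, t ≤ a
instance (intime : List Int) (tstart : List Int) (tstop : List Int) : Decidable (Pre_filterOnRange intime tstart tstop) := by unfold Pre_filterOnRange; infer_instance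
def pvWitness_filterOnRange : List Int × List Int × List Int := ([1, 5], [0, 4], [2, 6])

def Spec_filterOnRange (intime : List Int) (tstart : List Int) (tstop : List Int) (out : List Int) : Prop := out = filterOnRange_alt intime tstart tstop
instance (intime : List Int) (tstart : List Int) (tstop : List Int) (out : List Int) : Decidable (Spec_filterOnRange intime tstart tstop out) := by unfold Spec_filterOnRange; infer_instance

-- ===== CLAIM (what is proved, stated in full; the proofs are below) =====
def Claim_equal_filterOnRange : Prop := ∀ (intime : List Int) (tstart : List Int) (tstop : List Int), Dom_filterOnRange intime tstart tstop → Pre_filterOnRange intime tstart tstop → Spec_filterOnRange intime tstart tstop (filterOnRange intime tstart tstop)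

-- ===== LEMMAS AND PROOFS =====

-- A's inner step
def stepA (tstart tstop : List Int) (t i : Int) (outlist : List Int) (j : Int) : List Int :=
  if t > PySem.List.pyGetD tstart j 0 ∧ t < PySem.List.pyGetD tstop j 0 then
    if outlist.length = 0 then outlist ++ [i]
    else if i > PySem.List.pyGetD outlist (-1) 0 then outlist ++ [i]
    else outlist
  else outlist

-- once i is the last element, the inner loop never appends again
lemma stepA_stable (tstart tstop : List Int) (t i : Int) (js : List Int) (out : List Int) :
    js.foldl (stepA tstart tstop t i) (out ++ [i]) = out ++ [i] := by
  induction js with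
  | nil => rfl
  | cons j js ih =>
    simp only [List.foldl_cons]
    have h : stepA tstart tstop t i (out ++ [i]) j = out ++ [i] := by
      unfold stepA
      split_ifs with h1 h2 h3 <;> simp_all [PySem.List.pyGetD_neg_one_append_singleton]
    rw [h, ih]

-- the inner loop appends i once iff some interval matches, provided everything in out is < i
lemma inner_eq (tstart tstop : List Int) (t i : Int) (js : List Int) (out : List Int)
    (h : ∀ x ∈ out, x < i) :
    js.foldl (stepA tstart tstop t i) out =
      if js.any (fun j => decide (t > PySem.List.pyGetD tstart j 0 ∧ t < PySem.List.pyGetD tstop j 0)) then out ++ [i] else out := by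
  induction js with
  | nil => simp
  | cons j js ih =>
    simp only [List.foldl_cons, List.any_cons]
    by_cases hc : t > PySem.List.pyGetD tstart j 0 ∧ t < PySem.List.pyGetD tstop j 0
    · have hstep : stepA tstart tstop t i out j = out ++ [i] := by
        unfold stepA
        rcases out.eq_nil_or_concat with rfl | ⟨ys, y, rfl⟩
        · simp [hc]
        · have hy : y < i := h y (by simp)
          simp [hc, PySem.List.pyGetD_neg_one_append_singleton, hy]
      simp [hc, hstep, stepA_stable]
    · simp only [hc, decide_false, Bool.false_or]
      rw [show stepA tstart tstop t i out j = out from by unfold stepA; simp [hc]]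
      exact ih

-- the outer loop is a plain filter of the strictly increasing index list
lemma outer_eq (tstart tstop intime : List Int) (is_ : List Int) (out : List Int)
    (hp : is_.Pairwise (· < ·)) (h : ∀ x ∈ out, ∀ i ∈ is_, x < i) :
    is_.foldl (fun outlist i =>
        (PySem.List.pyRange 0 (tstart.length : Int) 1).foldl
          (stepA tstart tstop (PySem.List.pyGetD intime i 0) i) outlist) out =
      out ++ is_.filter (fun i =>
        (PySem.List.pyRange 0 (tstart.length : Int) 1).any
          (fun j => decide (PySem.List.pyGetD intime i 0 > PySem.List.pyGetD tstart j 0 ∧ PySem.List.pyGetD intime i 0 < PySem.List.pyGetD tstop j 0))) := by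
  induction is_ generalizing out with
  | nil => simp
  | cons i is_ ih =>
    rcases List.pairwise_cons.mp hp with ⟨hi, hp'⟩
    simp only [List.foldl_cons, List.filter_cons]
    rw [inner_eq _ _ _ _ _ _ (fun x hx => h x hx i (by simp))]
    by_cases hm : (PySem.List.pyRange 0 (tstart.length : Int) 1).any
        (fun j => decide (PySem.List.pyGetD intime i 0 > PySem.List.pyGetD tstart j 0 ∧ PySem.List.pyGetD intime i 0 < PySem.List.pyGetD tstop j 0))
    · have hnew : ∀ x ∈ out ++ [i], ∀ i' ∈ is_, x < i' := by
        intro x hx i' hi'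
        rcases List.mem_append.mp hx with hx | hx
        · exact h x hx i' (by simp [hi'])
        · simp at hx; subst hx; exact hi i' hi'
      rw [if_pos hm, if_pos hm, ih (out ++ [i]) hp' hnew]
      simp
    · rw [if_neg hm, if_neg hm,
        ih out hp' (fun x hx i' hi' => h x hx i' (by simp [hi']))]

-- under Pre_, A's indexed existence test is "t lies inside some zipped interval"
lemma any_zip_iff (tstart tstop : List Int) (t : Int)
    (hpre : ∀ a ∈ tstart.drop tstop.length, t ≤ a) :
    (PySem.List.pyRange 0 (tstart.length : Int) 1).any
        (fun j => decide (t > PySem.List.pyGetD tstart j 0 ∧ t < PySem.List.pyGetD tstop j 0)) = true ↔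
      ∃ p ∈ tstart.zip tstop, p.1 < t ∧ t < p.2 := by
  simp only [List.any_eq_true, PySem.List.mem_pyRange_one, decide_eq_true_eq]
  constructor
  · rintro ⟨j, ⟨hj0, hjlen⟩, hc⟩
    rcases hc with ⟨h1, h2⟩
    have hjn : j.toNat < tstart.length := by omega
    have hlt : j.toNat < tstop.length := by
      by_contra hge
      have hmem : tstart[j.toNat] ∈ tstart.drop tstop.length := by
        have : tstart[j.toNat] = (tstart.drop tstop.length)[j.toNat - tstop.length]'(by
          rw [List.length_drop]; omega) := by
          rw [List.getElem_drop]; congr 1; omega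
        rw [this]; exact List.getElem_mem _
      have := hpre _ hmem
      rw [PySem.List.pyGetD_eq_getElem tstart 0 hj0 (by exact_mod_cast hjlen)] at h1
      omega
    refine ⟨(tstart[j.toNat], tstop[j.toNat]), ?_, ?_, ?_⟩
    · rw [List.mem_iff_getElem]
      exact ⟨j.toNat, by simp [List.length_zip]; omega, by rw [List.getElem_zip]⟩
    · rw [PySem.List.pyGetD_eq_getElem tstart 0 hj0 (by exact_mod_cast hjlen)] at h1
      simpa using h1
    · rw [PySem.List.pyGetD_eq_getElem tstop 0 hj0 (by omega)] at h2
      simpa using h2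
  · rintro ⟨ab, hab, h1, h2⟩
    rw [List.mem_iff_getElem] at hab
    rcases hab with ⟨k, hk, hab⟩
    rw [List.length_zip] at hk
    rw [List.getElem_zip] at hab
    refine ⟨(k : Int), ⟨by omega, by omega⟩, ?_, ?_⟩
    · rw [PySem.List.pyGetD_eq_getElem tstart 0 (by omega) (by simp; omega)]
      have : ab.1 = tstart[k] := by rw [← hab]
      simp only [Int.toNat_natCast]
      omega
    · rw [PySem.List.pyGetD_eq_getElem tstop 0 (by omega) (by simp; omega)]
      have : ab.2 = tstop[k] := by rw [← hab]
      simp only [Int.toNat_natCast]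
      omega

-- ------- B side -------

-- merged-list invariant: starts nondecreasing and each stop ≤ every later start
def GoodR (p q : Int × Int) : Prop := p.1 ≤ q.1 ∧ p.2 ≤ q.1

lemma merge_fold (ivs : List (Int × Int)) : ∀ (m : List (Int × Int)) (c : Option (Int × Int)),
    ivs.Pairwise (fun p q => p.1 ≤ q.1) →
    (∀ p ∈ ivs, p.1 < p.2) →
    (m ++ c.toList).Pairwise GoodR →
    (∀ p ∈ m ++ c.toList, p.1 < p.2) →
    (∀ p ∈ m ++ c.toList, ∀ q ∈ ivs, p.1 ≤ q.1) →
    (c = none → m = []) →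
    ((((ivs.foldl stepB (m, c)).1 ++ ((ivs.foldl stepB (m, c)).2).toList).Pairwise GoodR) ∧
     (∀ p ∈ (ivs.foldl stepB (m, c)).1 ++ ((ivs.foldl stepB (m, c)).2).toList, p.1 < p.2) ∧
     (∀ t : Int, (∃ p ∈ (ivs.foldl stepB (m, c)).1 ++ ((ivs.foldl stepB (m, c)).2).toList,
          p.1 < t ∧ t < p.2) ↔
        ((∃ p ∈ m ++ c.toList, p.1 < t ∧ t < p.2) ∨ (∃ p ∈ ivs, p.1 < t ∧ t < p.2)))) := by
  induction ivs with
  | nil =>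
    intro m c _ _ hgood hglt _ _
    exact ⟨hgood, hglt, fun t => by simp⟩
  | cons ab ivs ih =>
    intro m c hsort hlt hgood hglt hfront hcm
    rcases List.pairwise_cons.mp hsort with ⟨hab, hsort'⟩
    have hablt : ab.1 < ab.2 := hlt ab (by simp)
    simp only [List.foldl_cons]
    cases c with
    | none =>
      have hm0 : m = [] := hcm rfl
      subst hm0
      have hstep : stepB (([] : List (Int × Int)), none) ab = ([], some ab) := rfl
      rw [hstep]
      have := ih [] (some ab) hsort' (fun p hp => hlt p (by simp [hp]))
        (by simp [GoodR])
        (by intro p hp; simp at hp; subst hp; exact hablt)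
        (by intro p hp q hq; simp at hp; subst hp; exact hab q hq) (by simp)
      refine ⟨this.1, this.2.1, fun t => ?_⟩
      rw [this.2.2 t]
      simp only [List.nil_append, Option.toList_some, Option.toList_none,
        List.mem_cons, List.not_mem_nil, false_and, exists_false, false_or, or_false]
      constructor
      · rintro (⟨p, rfl, hin⟩ | ⟨p, hp, hin⟩)
        · exact ⟨_, Or.inl rfl, hin⟩
        · exact ⟨p, Or.inr hp, hin⟩
      · rintro ⟨p, (rfl | hp), hin⟩
        · exact Or.inl ⟨_, rfl, hin⟩
        · exact Or.inr ⟨p, hp, hin⟩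
    | some cc =>
      have hcc1 : ∀ p ∈ m, GoodR p cc := by
        intro p hp
        have := List.pairwise_append.mp (by simpa using hgood)
        exact this.2.2 p hp cc (by simp)
      have hcclt : cc.1 < cc.2 := hglt cc (by simp)
      have hccab : cc.1 ≤ ab.1 := hfront cc (by simp) ab (by simp)
      by_cases h1 : ab.1 < cc.2
      · by_cases h2 : ab.2 > cc.2
        · have hstep : stepB (m, some cc) ab = (m, some (cc.1, ab.2)) := by
            simp [stepB, h1, h2]
          rw [hstep]
          have := ih m (some (cc.1, ab.2)) hsort' (fun p hp => hlt p (by simp [hp]))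
            (by
              rw [List.pairwise_append]
              refine ⟨(List.pairwise_append.mp (by simpa using hgood)).1, by simp, ?_⟩
              intro p hp q hq
              simp at hq; subst hq
              exact hcc1 p hp)
            (by
              intro p hp
              rcases List.mem_append.mp hp with hp | hp
              · exact hglt p (by simp [hp])
              · simp at hp; subst hp; exact lt_of_le_of_lt hccab hablt)
            (by
              intro p hp q hq
              rcases List.mem_append.mp hp with hp | hp
              · exact hfront p (by simp [hp]) q (by simp [hq])
              · simp at hp; subst hp
                exact le_trans hccab (hab q hq))
            (by simp)
          refine ⟨this.1, this.2.1, fun t => ?_⟩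
          rw [this.2.2 t]
          constructor
          · rintro (⟨p, hp, hin⟩ | hrest)
            · rcases List.mem_append.mp hp with hp | hp
              · exact Or.inl ⟨p, by simp [hp], hin⟩
              · have hp' : p = (cc.1, ab.2) := by simpa using hp
                rw [hp'] at hin
                by_cases ht : t < cc.2
                · exact Or.inl ⟨cc, by simp, hin.1, ht⟩
                · exact Or.inr ⟨ab, by simp, by omega, hin.2⟩
            · rcases hrest with ⟨p, hp, hin⟩
              exact Or.inr ⟨p, by simp [hp], hin⟩
          · rintro (⟨p, hp, hin⟩ | ⟨p, hp, hin⟩)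
            · rcases List.mem_append.mp hp with hp | hp
              · exact Or.inl ⟨p, by simp [hp], hin⟩
              · have hp' : p = cc := by simpa using hp
                rw [hp'] at hin
                exact Or.inl ⟨(cc.1, ab.2), by simp, by simp; omega⟩
            · rcases List.mem_cons.mp hp with hp | hp
              · rw [hp] at hin
                exact Or.inl ⟨(cc.1, ab.2), by simp, by simp; omega⟩
              · exact Or.inr ⟨p, hp, hin⟩
        · have hstep : stepB (m, some cc) ab = (m, some cc) := by
            simp [stepB, h1, h2]
          rw [hstep]
          have := ih m (some cc) hsort' (fun p hp => hlt p (by simp [hp])) hgood hglt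
            (fun p hp q hq => hfront p hp q (by simp [hq])) (by simp)
          refine ⟨this.1, this.2.1, fun t => ?_⟩
          rw [this.2.2 t]
          constructor
          · rintro (hl | hr)
            · exact Or.inl hl
            · rcases hr with ⟨p, hp, hin⟩
              exact Or.inr ⟨p, by simp [hp], hin⟩
          · rintro (hl | ⟨p, hp, hin⟩)
            · exact Or.inl hl
            · rcases List.mem_cons.mp hp with hp | hp
              · rw [hp] at hin
                exact Or.inl ⟨cc, by simp, by omega⟩
              · exact Or.inr ⟨p, hp, hin⟩
      · have hstep : stepB (m, some cc) ab = (m ++ [cc], some ab) := by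
          simp [stepB, h1]
        rw [hstep]
        have := ih (m ++ [cc]) (some ab) hsort' (fun p hp => hlt p (by simp [hp]))
          (by
            rw [List.pairwise_append]
            refine ⟨by simpa using hgood, by simp, ?_⟩
            intro p hp q hq
            have hq' : q = ab := by simpa using hq
            rw [hq']
            rcases List.mem_append.mp hp with hp | hp
            · have hg := hcc1 p hp
              exact ⟨hfront p (by simp [hp]) ab (by simp), by
                rcases hg with ⟨_, hg2⟩; omega⟩
            · have hp' : p = cc := by simpa using hp
              rw [hp']
              exact ⟨hccab, by omega⟩)
          (by
            intro p hp
            simp only [List.append_assoc] at hp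
            rcases List.mem_append.mp hp with hp | hp
            · exact hglt p (by simp [hp])
            · simp at hp
              rcases hp with hp | hp <;> rw [hp]
              · exact hcclt
              · exact hablt)
          (by
            intro p hp q hq
            simp only [List.append_assoc] at hp
            rcases List.mem_append.mp hp with hp | hp
            · exact hfront p (by simp [hp]) q (by simp [hq])
            · simp at hp
              rcases hp with hp | hp <;> rw [hp]
              · exact le_trans hccab (hab q hq)
              · exact hab q hq)
          (by simp)
        refine ⟨this.1, this.2.1, fun t => ?_⟩
        rw [this.2.2 t]
        constructor
        · rintro (⟨p, hp, hin⟩ | ⟨p, hp, hin⟩)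
          · simp only [List.append_assoc] at hp
            rcases List.mem_append.mp hp with hp | hp
            · exact Or.inl ⟨p, by simp [hp], hin⟩
            · simp only [List.cons_append, List.nil_append, Option.toList_some,
                List.mem_cons, List.not_mem_nil, or_false] at hp
              rcases hp with hp | hp
              · rw [hp] at hin; exact Or.inl ⟨cc, by simp, hin⟩
              · rw [hp] at hin; exact Or.inr ⟨ab, by simp, hin⟩
          · exact Or.inr ⟨p, by simp [hp], hin⟩
        · rintro (⟨p, hp, hin⟩ | ⟨p, hp, hin⟩)
          · refine Or.inl ⟨p, ?_, hin⟩
            rcases (show p ∈ m ∨ p = cc by simpa using hp) with h | h <;> simp [h]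
          · rcases List.mem_cons.mp hp with hp | hp
            · rw [hp] at hin
              exact Or.inl ⟨ab, by simp, hin⟩
            · exact Or.inr ⟨p, hp, hin⟩
lemma bsLoop_spec (starts : List Int) (t : Int)
    (hmono : starts.Pairwise (· ≤ ·)) :
    ∀ (n : Nat) (lo hi : Int), (hi - lo).toNat ≤ n → 0 ≤ lo → lo ≤ hi → hi ≤ (starts.length : Int) →
    (∀ (k : Nat) (hk : k < starts.length), (k : Int) < lo → starts[k] < t) →
    (∀ (k : Nat) (hk : k < starts.length), hi ≤ (k : Int) → t ≤ starts[k]) →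
    lo ≤ bsLoop starts t lo hi ∧ bsLoop starts t lo hi ≤ hi ∧
    (∀ (k : Nat) (hk : k < starts.length),
      ((k : Int) < bsLoop starts t lo hi → starts[k] < t) ∧
      (bsLoop starts t lo hi ≤ (k : Int) → t ≤ starts[k])) := by
  have hm := List.pairwise_iff_getElem.mp hmono
  intro n
  induction n with
  | zero =>
    intro lo hi hn h0 hlh hhi hlow hhigh
    have hnlt : ¬ lo < hi := by omega
    rw [bsLoop, dif_neg hnlt]
    exact ⟨le_refl _, by omega, fun k hk =>
      ⟨fun h => hlow k hk h, fun h => hhigh k hk (by omega)⟩⟩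
  | succ n ih =>
    intro lo hi hn h0 hlh hhi hlow hhigh
    by_cases h : lo < hi
    · have hmid := PySem.Int.floordiv_two_mid_bounds (lo := lo) (hi := hi) h.le
      have hmid2 : PySem.Int.floordiv (lo + hi) 2 < hi := by
        rw [PySem.Int.floordiv_lt_iff_lt_mul (by omega)]; omega
      rw [bsLoop, dif_pos h]
      set mid := PySem.Int.floordiv (lo + hi) 2 with hmiddef
      have hmn : mid.toNat < starts.length := by omega
      have hget : PySem.List.pyGetD starts mid 0 = starts[mid.toNat] :=
        PySem.List.pyGetD_eq_getElem starts 0 (by omega) (by omega)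
      by_cases hc : PySem.List.pyGetD starts mid 0 < t
      · rw [if_pos hc]
        have hlow' : ∀ (k : Nat) (hk : k < starts.length), (k : Int) < mid + 1 → starts[k] < t := by
          intro k hk hklt
          by_cases hkm : k < mid.toNat
          · have := hm k mid.toNat hk hmn hkm
            omega
          · have : k = mid.toNat := by omega
            subst this
            omega
        have := ih (mid + 1) hi (by omega) (by omega) (by omega) hhi hlow' hhigh
        exact ⟨by omega, this.2.1, this.2.2⟩
      · rw [if_neg hc]
        have hhigh' : ∀ (k : Nat) (hk : k < starts.length), mid ≤ (k : Int) → t ≤ starts[k] := by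
          intro k hk hkge
          have : starts[mid.toNat] ≤ starts[k] := by
            by_cases hkm : mid.toNat < k
            · exact hm mid.toNat k hmn hk hkm
            · have heq : mid.toNat = k := by omega
              exact le_of_eq (by congr 1)
          omega
        have := ih lo mid (by omega) h0 (by omega) (by omega) hlow hhigh'
        exact ⟨this.1, by omega, this.2.2⟩
    · rw [bsLoop, dif_neg h]
      exact ⟨le_refl _, by omega, fun k hk =>
        ⟨fun hh => hlow k hk hh, fun hh => hhigh k hk (by omega)⟩⟩

-- the binary-search test over a Good merged list is "t lies inside some merged range"
lemma test_iff (M : List (Int × Int)) (hg : M.Pairwise GoodR) (t : Int) :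
    (bsLoop (M.map (fun p => p.1)) t 0 (((M.map (fun p => p.1)).length : Nat) : Int) > 0 ∧
      t < PySem.List.pyGetD (M.map (fun p => p.2))
        (bsLoop (M.map (fun p => p.1)) t 0 (((M.map (fun p => p.1)).length : Nat) : Int) - 1) 0) ↔
    ∃ p ∈ M, p.1 < t ∧ t < p.2 := by
  have hmono : (M.map (fun p => p.1)).Pairwise (· ≤ ·) :=
    hg.map _ (fun a b h => h.1)
  have hspec := bsLoop_spec (M.map (fun p => p.1)) t hmono
    (((M.map (fun p => p.1)).length : Nat) : Int).toNat 0 (((M.map (fun p => p.1)).length : Nat) : Int)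
    (by omega) (by omega) (by omega) (by omega)
    (by intro k hk h; omega) (by intro k hk h; simp at hk; omega)
  set r := bsLoop (M.map (fun p => p.1)) t 0 (((M.map (fun p => p.1)).length : Nat) : Int) with hr
  obtain ⟨hr0, hrhi, hchar⟩ := hspec
  have hlenS : (M.map (fun p => p.1)).length = M.length := by simp
  have hlenP : (M.map (fun p => p.2)).length = M.length := by simp
  have hpw := List.pairwise_iff_getElem.mp hg
  constructor
  · rintro ⟨hpos, ht⟩
    have hk : (r - 1).toNat < M.length := by omega
    have hget : PySem.List.pyGetD (M.map (fun p => p.2)) (r - 1) 0 =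
        (M.map (fun p => p.2))[(r - 1).toNat] :=
      PySem.List.pyGetD_eq_getElem _ 0 (by omega) (by omega)
    rw [hget] at ht
    refine ⟨M[(r - 1).toNat], List.getElem_mem _, ?_, ?_⟩
    · have := (hchar (r - 1).toNat (by omega)).1 (by omega)
      simpa using this
    · simpa using ht
  · rintro ⟨p, hp, h1, h2⟩
    rcases List.mem_iff_getElem.mp hp with ⟨k, hk, hkp⟩
    have hkS : k < (M.map (fun p => p.1)).length := by omega
    have hklt : (k : Int) < r := by
      by_contra hge
      have := (hchar k hkS).2 (by omega)
      rw [List.getElem_map, hkp] at this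
      omega
    have hpos : r > 0 := by omega
    have hk1 : (r - 1).toNat < M.length := by omega
    have hkeq : k = (r - 1).toNat := by
      by_contra hne
      have hklt' : k < (r - 1).toNat := by omega
      have hgood := hpw k (r - 1).toNat hk hk1 hklt'
      have hstart := (hchar (r - 1).toNat (by omega)).1 (by omega)
      rw [List.getElem_map] at hstart
      rw [hkp] at hgood
      have := hgood.2
      omega
    refine ⟨hpos, ?_⟩
    have hget : PySem.List.pyGetD (M.map (fun p => p.2)) (r - 1) 0 =
        (M.map (fun p => p.2))[(r - 1).toNat] :=
      PySem.List.pyGetD_eq_getElem _ 0 (by omega) (by omega)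
    rw [hget, List.getElem_map]
    have heq : M[(r - 1).toNat]'hk1 = p := by subst hkeq; exact hkp
    rw [heq]
    exact h2

-- sorting and dropping empty ranges keeps the union of the open ranges
lemma ivs_cover (tstart tstop : List Int) (t : Int) :
    (∃ p ∈ PySem.List.sorted ((tstart.zip tstop).filter (fun p => decide (p.1 < p.2)))
        (fun p => p.1) false, p.1 < t ∧ t < p.2) ↔
    ∃ p ∈ tstart.zip tstop, p.1 < t ∧ t < p.2 := by
  constructor
  · rintro ⟨p, hp, hin⟩
    exact ⟨p, (List.mem_filter.mp ((PySem.List.mem_sorted _ _ _ _).mp hp)).1, hin⟩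
  · rintro ⟨p, hp, hin⟩
    exact ⟨p, (PySem.List.mem_sorted _ _ _ _).mpr
      (List.mem_filter.mpr ⟨hp, by simp; omega⟩), hin⟩

-- B computes the filter of the index range by "t lies inside some zipped range"
lemma altB_eq (intime tstart tstop : List Int) :
    filterOnRange_alt intime tstart tstop =
      (PySem.List.pyRange 0 (intime.length : Int) 1).filter
        (fun j => decide (∃ p ∈ tstart.zip tstop,
          p.1 < PySem.List.pyGetD intime j 0 ∧ PySem.List.pyGetD intime j 0 < p.2)) := by
  unfold filterOnRange_alt
  simp only []
  have hsortp := PySem.List.sorted_pairwise ((tstart.zip tstop).filter (fun p => decide (p.1 < p.2))) (fun p => p.1)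
  have hltp : ∀ p ∈ PySem.List.sorted ((tstart.zip tstop).filter (fun p => decide (p.1 < p.2)))
      (fun p => p.1) false, p.1 < p.2 := by
    intro p hp
    have := (List.mem_filter.mp ((PySem.List.mem_sorted _ _ _ _).mp hp)).2
    simpa using this
  set ivs := PySem.List.sorted ((tstart.zip tstop).filter (fun p => decide (p.1 < p.2)))
    (fun p => p.1) false with hivs
  have hmerge := merge_fold ivs [] none hsortp hltp (by simp) (by simp) (by simp) (fun _ => rfl)
  set mc := ivs.foldl stepB (([], none) : List (Int × Int) × Option (Int × Int)) with hmc
  have hmm : (match mc.2 with | none => mc.1 | some c => mc.1 ++ [c]) = mc.1 ++ mc.2.toList := by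
    cases mc.2 <;> simp
  rw [hmm]
  set M := mc.1 ++ mc.2.toList with hM
  rw [PySem.List.enumerate_eq_map_pyRange intime 0, List.foldl_map]
  simp only [PySem.List.len_eq]
  rw [PySem.List.foldl_append_ite_eq_filter
    (fun j => bsLoop (M.map (fun p => p.1)) (PySem.List.pyGetD intime j 0) 0
        (((M.map (fun p => p.1)).length : Nat) : Int) > 0 ∧
      PySem.List.pyGetD intime j 0 < PySem.List.pyGetD (M.map (fun p => p.2))
        (bsLoop (M.map (fun p => p.1)) (PySem.List.pyGetD intime j 0) 0
          (((M.map (fun p => p.1)).length : Nat) : Int) - 1) 0)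
    (PySem.List.pyRange 0 (intime.length : Int) 1) []]
  rw [List.nil_append]
  apply List.filter_congr
  intro j _
  rw [decide_eq_decide]
  refine (test_iff M hmerge.1 (PySem.List.pyGetD intime j 0)).trans
    ((hmerge.2.2 (PySem.List.pyGetD intime j 0)).trans ?_)
  simp only [List.nil_append, Option.toList_none, List.not_mem_nil, false_and,
    exists_false, false_or]
  rw [hivs]
  exact ivs_cover tstart tstop _

-- A computes the same filter, on inputs where it does not raise
lemma aEq (intime tstart tstop : List Int)
    (hpre : ∀ a ∈ tstart.drop tstop.length, ∀ t ∈ intime, t ≤ a) :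
    filterOnRange intime tstart tstop =
      (PySem.List.pyRange 0 (intime.length : Int) 1).filter
        (fun j => decide (∃ p ∈ tstart.zip tstop,
          p.1 < PySem.List.pyGetD intime j 0 ∧ PySem.List.pyGetD intime j 0 < p.2)) := by
  unfold filterOnRange
  have hA := outer_eq tstart tstop intime (PySem.List.pyRange 0 (intime.length : Int) 1) []
    (PySem.List.pairwise_lt_pyRange_one 0 (intime.length : Int))
    (by intro x hx; cases hx)
  rw [show (fun (outlist : List Int) (i : Int) =>
      (PySem.List.pyRange 0 (tstart.length : Int) 1).foldl
        (stepA tstart tstop (PySem.List.pyGetD intime i 0) i) outlist) =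
      (fun outlist i =>
      (PySem.List.pyRange 0 (tstart.length : Int) 1).foldl (fun outlist j =>
        if PySem.List.pyGetD intime i 0 > PySem.List.pyGetD tstart j 0 ∧
           PySem.List.pyGetD intime i 0 < PySem.List.pyGetD tstop j 0 then
          if outlist.length = 0 then outlist ++ [i]
          else if i > PySem.List.pyGetD outlist (-1) 0 then outlist ++ [i]
          else outlist
        else outlist) outlist) from rfl] at hA
  rw [hA, List.nil_append]
  apply List.filter_congr
  intro i hi
  rw [PySem.List.mem_pyRange_one] at hi
  rw [Bool.eq_iff_iff, decide_eq_true_iff]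
  exact any_zip_iff tstart tstop _
    (fun a ha => hpre a ha _ (PySem.List.pyGetD_mem intime 0 ⟨by omega, by exact_mod_cast hi.2⟩))

-- ===== VERDICT (by name: the statement is the Claim_ definition above) =====
theorem filterOnRange_spec : Claim_equal_filterOnRange := by
  intro intime tstart tstop _ hpre
  unfold Spec_filterOnRange
  rw [aEq intime tstart tstop hpre, altB_eq]
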